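-- pv_equiv track=rewrite | github.com/ttzytt/PyAutoGrade | tests/Block 4/tested_code/8/Unit 1/math_functions_review.py | new_triangular
-- ===== SOURCE A (Python) =====
-- def new_triangular(player_number):
--     new_triangular = player_number
--
--     if player_number % 2 == 0:
--
--         while player_number > 2:
--             new_triangular = new_triangular + (player_number - 2)
--             player_number = player_number - 2
--     else:
--
--         while player_number > 1:
--             new_triangular = new_triangular + (player_number - 2)
--             player_number = player_number - 2
--     return(new_triangular)
-- ===== SOURCE B (Python) =====
-- def new_triangular(player_number):
--     if player_number % 2 == 0:
--         if player_number <= 2: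
--             return player_number
--         h = player_number // 2
--         return h * (h + 1)
--     if player_number <= 1:
--         return player_number
--     h = (player_number + 1) // 2
--     return h * h
-- ===== Notes on version B (the rewrite author's own statement) =====
-- stated objective: faster
-- what changed: Replaced the decrement-by-2 while loops with closed-form arithmetic-series formulas (sum of evens / sum of odds), keeping A's pass-through behaviour for small inputs.
import Mathlib
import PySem

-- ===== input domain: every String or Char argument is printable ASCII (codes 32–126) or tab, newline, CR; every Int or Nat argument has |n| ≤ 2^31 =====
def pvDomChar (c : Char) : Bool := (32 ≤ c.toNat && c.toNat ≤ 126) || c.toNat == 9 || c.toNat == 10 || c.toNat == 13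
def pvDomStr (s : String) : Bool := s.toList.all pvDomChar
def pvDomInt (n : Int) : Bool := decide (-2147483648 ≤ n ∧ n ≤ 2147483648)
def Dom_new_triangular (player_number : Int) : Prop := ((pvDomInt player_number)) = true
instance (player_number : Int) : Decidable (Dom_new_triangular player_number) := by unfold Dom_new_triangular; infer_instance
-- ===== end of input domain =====

-- B replaces A's decrement-by-2 while loops with closed-form arithmetic-series formulas (O(1) vs O(n)).


-- ===== PORT A =====
-- while player_number > 2: acc += player_number - 2; player_number -= 2
def ntLoopEven (acc p : Int) : Int :=
  if h : p > 2 then ntLoopEven (acc + (p - 2)) (p - 2) else acc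
termination_by p.toNat
decreasing_by omega

-- while player_number > 1: acc += player_number - 2; player_number -= 2
def ntLoopOdd (acc p : Int) : Int :=
  if h : p > 1 then ntLoopOdd (acc + (p - 2)) (p - 2) else acc
termination_by p.toNat
decreasing_by omega

def new_triangular (player_number : Int) : Int :=
  if PySem.Int.mod player_number 2 == 0 then
    ntLoopEven player_number player_number
  else
    ntLoopOdd player_number player_number

-- ===== PORT B =====
def new_triangular_alt (player_number : Int) : Int :=
  if PySem.Int.mod player_number 2 == 0 then
    if player_number ≤ 2 then player_number
    else
      let h := PySem.Int.floordiv player_number 2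
      h * (h + 1)
  else
    if player_number ≤ 1 then player_number
    else
      let h := PySem.Int.floordiv (player_number + 1) 2
      h * h

-- ===== PRECONDITION & SPEC =====
def Spec_new_triangular (player_number : Int) (out : Int) : Prop := out = new_triangular_alt player_number
instance (player_number : Int) (out : Int) : Decidable (Spec_new_triangular player_number out) := by unfold Spec_new_triangular; infer_instance

-- ===== CLAIM (what is proved, stated in full; the proofs are below) =====
def Claim_equal_new_triangular : Prop := ∀ (player_number : Int), Dom_new_triangular player_number → Spec_new_triangular player_number (new_triangular player_number)

-- ===== LEMMAS AND PROOFS =====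

theorem ntLoopEven_stop (acc p : Int) (h : ¬ p > 2) : ntLoopEven acc p = acc := by
  rw [ntLoopEven]; simp [h]

theorem ntLoopOdd_stop (acc p : Int) (h : ¬ p > 1) : ntLoopOdd acc p = acc := by
  rw [ntLoopOdd]; simp [h]

theorem ntLoopEven_closed (k : Nat) : ∀ acc : Int, ntLoopEven acc (2 * (k : Int)) = acc + (k : Int) * ((k : Int) + 1) - 2 * (k : Int) := by
  induction k with
  | zero => intro acc; rw [ntLoopEven_stop acc _ (by omega)]; push_cast; ring
  | succ n ih =>
    intro acc
    by_cases hn : n = 0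
    · subst hn; rw [ntLoopEven_stop acc _ (by omega)]; push_cast; ring
    · rw [ntLoopEven]
      have h2 : (2 : Int) * ((n : Int) + 1) > 2 := by omega
      push_cast
      simp only [show (2 : Int) * ((n : Int) + 1) > 2 from h2, dif_pos]
      have : (2 : Int) * ((n : Int) + 1) - 2 = 2 * (n : Int) := by ring
      rw [this]
      have := ih (acc + (2 * ((n : Int) + 1) - 2))
      rw [show acc + (2 * ((n : Int) + 1) - 2) = acc + 2 * (n : Int) by ring] at this
      rw [show (2:Int) * ((n:Int)+1) - 2 = 2 * (n:Int) by ring] at *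
      rw [this]; ring

theorem ntLoopOdd_closed (k : Nat) : ∀ acc : Int, ntLoopOdd acc (2 * (k : Int) + 1) = acc + (k : Int) * (k : Int) := by
  induction k with
  | zero => intro acc; rw [ntLoopOdd_stop acc _ (by omega)]; push_cast; ring
  | succ n ih =>
    intro acc
    rw [ntLoopOdd]
    have h1 : (2 : Int) * ((n : Int) + 1) + 1 > 1 := by omega
    push_cast
    simp only [show (2 : Int) * ((n : Int) + 1) + 1 > 1 from h1, dif_pos]
    have := ih (acc + (2 * ((n : Int) + 1) + 1 - 2))
    rw [show (2:Int) * ((n:Int)+1) + 1 - 2 = 2 * (n:Int) + 1 by ring] at *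
    rw [this]; ring

-- ===== VERDICT (by name: the statement is the Claim_ definition above) =====
theorem new_triangular_spec : Claim_equal_new_triangular := by
  intro n _
  unfold Spec_new_triangular new_triangular new_triangular_alt
  have hmod : PySem.Int.mod n 2 = n % 2 := PySem.Int.mod_eq_emod_of_pos (by omega)
  by_cases he : n % 2 = 0
  · simp only [hmod, he]
    simp only [beq_self_eq_true, if_true]
    by_cases hle : n ≤ 2
    · rw [ntLoopEven_stop n n (by omega)]; simp [hle]
    · simp only [hle, if_false]
      have hdiv : PySem.Int.floordiv n 2 = n / 2 := PySem.Int.floordiv_eq_ediv_of_pos (by omega)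
      have hk : n = 2 * ((n / 2).toNat : Int) := by omega
      calc ntLoopEven n n = ntLoopEven n (2 * ((n / 2).toNat : Int)) := by rw [← hk]
        _ = n + ((n / 2).toNat : Int) * (((n / 2).toNat : Int) + 1) - 2 * ((n / 2).toNat : Int) := ntLoopEven_closed _ n
        _ = PySem.Int.floordiv n 2 * (PySem.Int.floordiv n 2 + 1) := by rw [hdiv]; have : ((n / 2).toNat : Int) = n / 2 := by omega
                                                                        rw [this]; omega
  · simp only [hmod]
    have : ¬ ((n % 2 == 0) = true) := by simpa using he
    simp only [this]
    by_cases hle : n ≤ 1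
    · rw [ntLoopOdd_stop n n (by omega)]; simp [hle]
    · simp only [hle, if_false]
      have hdiv : PySem.Int.floordiv (n + 1) 2 = (n + 1) / 2 := PySem.Int.floordiv_eq_ediv_of_pos (by omega)
      have hk : n = 2 * ((n / 2).toNat : Int) + 1 := by omega
      calc ntLoopOdd n n = ntLoopOdd n (2 * ((n / 2).toNat : Int) + 1) := by rw [← hk]
        _ = n + ((n / 2).toNat : Int) * ((n / 2).toNat : Int) := ntLoopOdd_closed _ n
        _ = PySem.Int.floordiv (n + 1) 2 * PySem.Int.floordiv (n + 1) 2 := by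
              rw [hdiv]; have : ((n / 2).toNat : Int) = (n + 1) / 2 - 1 := by omega
              rw [this]; have h2 : (n + 1) / 2 = (n / 2) + 1 := by omega
              nlinarith [h2]
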